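-- pv_equiv track=rewrite | github.com/harmetsm/notionreader | backend/app.py | _best_isbn
-- ===== SOURCE A (Python) =====
-- from typing import Any, Dict, List, Optional
--
-- def _best_isbn(identifiers: List[Dict[str, str]]) -> Optional[str]:
--     if not identifiers:
--         return None
--     for kind in ("ISBN_13", "ISBN_10"):
--         for item in identifiers:
--             if item.get("type") == kind:
--                 return item.get("identifier")
--     return identifiers[0].get("identifier")
-- ===== SOURCE B (Python) =====
-- def _best_isbn(identifiers):
--     if not identifiers:
--         return None
--     have13 = have10 = False
--     cand13 = cand10 = None
--     for item in identifiers: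
--         t = item.get("type")
--         if t == "ISBN_13" and not have13:
--             have13, cand13 = True, item.get("identifier")
--         elif t == "ISBN_10" and not have10:
--             have10, cand10 = True, item.get("identifier")
--     if have13:
--         return cand13
--     if have10:
--         return cand10
--     return identifiers[0].get("identifier")
-- ===== Notes on version B (the rewrite author's own statement) =====
-- stated objective: alternative
-- what changed: Replaces A's two sequential full scans (one per preferred kind) with a single pass that folds a pair accumulator recording the first-seen ISBN_13 and ISBN_10 identifiers, then picks by priority.
import Mathlib
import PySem

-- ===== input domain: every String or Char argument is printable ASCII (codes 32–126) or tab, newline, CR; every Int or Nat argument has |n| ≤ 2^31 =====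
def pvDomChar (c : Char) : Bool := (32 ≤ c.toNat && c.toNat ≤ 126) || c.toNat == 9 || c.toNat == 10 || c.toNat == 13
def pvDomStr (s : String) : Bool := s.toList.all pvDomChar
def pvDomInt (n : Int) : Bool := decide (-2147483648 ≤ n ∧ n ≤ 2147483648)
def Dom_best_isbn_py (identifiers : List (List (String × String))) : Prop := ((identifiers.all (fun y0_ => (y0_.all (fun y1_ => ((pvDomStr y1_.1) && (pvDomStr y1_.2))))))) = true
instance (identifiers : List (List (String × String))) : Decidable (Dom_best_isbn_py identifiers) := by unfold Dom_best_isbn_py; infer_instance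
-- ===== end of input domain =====

-- B replaces A's two sequential scans (one per preferred ISBN kind) with a single fold
-- keeping a pair of first-seen candidates for ISBN_13 and ISBN_10, then picks by priority.


-- ===== PORT A =====
-- inner loop 'for item in identifiers: if item.get("type") == kind: return item.get("identifier")'
def scanKindA (kind : String) : List (List (String × String)) → Option (Option String)
  | [] => none
  | item :: rest =>
    if (PySem.Dict.mk item).get? "type" = some kind then some ((PySem.Dict.mk item).get? "identifier")
    else scanKindA kind rest

def best_isbn_py (identifiers : List (List (String × String))) : Option String :=
  match identifiers with
  | [] => none
  | first :: _ =>
    match scanKindA "ISBN_13" identifiers with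
    | some v => v
    | none =>
      match scanKindA "ISBN_10" identifiers with
      | some v => v
      | none => (PySem.Dict.mk first).get? "identifier"

-- ===== PORT B =====
-- state: (first-seen ISBN_13 identifier if any, first-seen ISBN_10 identifier if any);
-- 'have13/cand13' and 'have10/cand10' are each fused into one Option (Option String)
def stepB (acc : Option (Option String) × Option (Option String))
    (item : List (String × String)) : Option (Option String) × Option (Option String) :=
  let t := (PySem.Dict.mk item).get? "type"
  if t = some "ISBN_13" ∧ acc.1 = none then
    (some ((PySem.Dict.mk item).get? "identifier"), acc.2)
  else if t = some "ISBN_10" ∧ acc.2 = none then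
    (acc.1, some ((PySem.Dict.mk item).get? "identifier"))
  else acc

def best_isbn_py_alt (identifiers : List (List (String × String))) : Option String :=
  match identifiers with
  | [] => none
  | first :: _ =>
    let acc := identifiers.foldl stepB (none, none)
    match acc.1 with
    | some v => v
    | none =>
      match acc.2 with
      | some v => v
      | none => (PySem.Dict.mk first).get? "identifier"

-- ===== PRECONDITION & SPEC =====
def Spec_best_isbn_py (identifiers : List (List (String × String))) (out : Option String) : Prop := out = best_isbn_py_alt identifiers
instance (identifiers : List (List (String × String))) (out : Option String) : Decidable (Spec_best_isbn_py identifiers out) := by unfold Spec_best_isbn_py; infer_instance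

-- ===== CLAIM =====
def Claim_equal_best_isbn_py : Prop := ∀ (identifiers : List (List (String × String))), Dom_best_isbn_py identifiers → Spec_best_isbn_py identifiers (best_isbn_py identifiers)

-- ===== LEMMAS AND PROOFS =====

-- each component of the fold is A's first-match scan for its kind (starting from any state)
lemma foldl_stepB (l : List (List (String × String)))
    (a b : Option (Option String)) :
    l.foldl stepB (a, b)
      = ((match a with | some v => some v | none => scanKindA "ISBN_13" l),
         (match b with | some v => some v | none => scanKindA "ISBN_10" l)) := by
  induction l generalizing a b with
  | nil => cases a <;> cases b <;> simp [scanKindA]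
  | cons item rest ih =>
    simp only [List.foldl_cons, scanKindA, stepB]
    by_cases h13 : (PySem.Dict.mk item).get? "type" = some "ISBN_13" ∧ a = none
    · obtain ⟨ht, ha⟩ := h13
      simp [ht, ha, ih]
    · by_cases h10 : (PySem.Dict.mk item).get? "type" = some "ISBN_10" ∧ b = none
      · obtain ⟨ht, hb⟩ := h10
        simp [ht, hb, ih]
      · simp [h13, h10, ih]
        constructor
        · cases a with
          | some v => simp
          | none =>
            simp
            have : (PySem.Dict.mk item).get? "type" ≠ some "ISBN_13" := fun h => h13 ⟨h, rfl⟩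
            simp [this]
        · cases b with
          | some v => simp
          | none =>
            simp
            have : (PySem.Dict.mk item).get? "type" ≠ some "ISBN_10" := fun h => h10 ⟨h, rfl⟩
            simp [this]

-- ===== VERDICT =====
theorem best_isbn_py_spec : Claim_equal_best_isbn_py := by
  intro ids _
  unfold Spec_best_isbn_py best_isbn_py best_isbn_py_alt
  cases ids with
  | nil => rfl
  | cons first rest =>
    simp only [foldl_stepB]
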